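-- pv_equiv track=rewrite | github.com/informalsystems/modelator-py | modelator_py/util/tla/to_str.py | _glue_prefix_box
-- ===== SOURCE A (Python) =====
-- def _glue_prefix_box(prefix, box, indent_width=None):
--     """Concatenate strings with proper indentation."""
--     lines = box.split("\n")
--     if indent_width is None:
--         prefix_lines = prefix.split("\n")
--         indent_width = len(prefix_lines[-1])
--     indent = indent_width * " "
--     res_lines = [prefix + lines[0]]
--     res_lines.extend(indent + line for line in lines[1:])
--     res = "\n".join(res_lines)
--     return res
-- ===== SOURCE B (Python) =====
-- def _glue_prefix_box(prefix, box, indent_width=None):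
--     """Concatenate strings with proper indentation."""
--     if indent_width is None:
--         # backward scan instead of splitting the prefix into lines
--         indent_width = 0
--         for ch in reversed(prefix):
--             if ch == "\n":
--                 break
--             indent_width += 1
--     indent = indent_width * " "
--     # single character-level pass: emit each char, inserting indent after newlines
--     out = list(prefix)
--     for ch in box:
--         out.append(ch)
--         if ch == "\n":
--             out.extend(indent)
--     return "".join(out)
-- ===== Notes on version B (the rewrite author's own statement) =====
-- stated objective: alternative
-- what changed: Replaces A's split-into-lines / per-line-indent / join pipeline with a single character-level pass that appends each char and inserts the indent right after every newline, and computes the default indent width by scanning the prefix backwards instead of splitting it.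
import Mathlib
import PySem

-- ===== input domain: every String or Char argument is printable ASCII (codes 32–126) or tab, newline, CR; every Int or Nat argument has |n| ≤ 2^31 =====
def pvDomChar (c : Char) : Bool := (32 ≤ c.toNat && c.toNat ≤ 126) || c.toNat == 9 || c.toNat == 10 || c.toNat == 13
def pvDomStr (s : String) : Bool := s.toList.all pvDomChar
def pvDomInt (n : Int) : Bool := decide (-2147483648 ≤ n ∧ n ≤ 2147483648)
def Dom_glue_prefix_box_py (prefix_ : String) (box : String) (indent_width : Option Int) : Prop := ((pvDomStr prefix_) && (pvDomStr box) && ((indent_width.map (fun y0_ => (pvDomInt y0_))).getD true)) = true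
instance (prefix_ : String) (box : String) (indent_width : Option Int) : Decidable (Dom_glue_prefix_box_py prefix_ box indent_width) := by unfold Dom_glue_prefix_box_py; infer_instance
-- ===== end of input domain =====

-- B replaces A's split-into-lines / per-line-indent / join pipeline with a single
-- character-level pass inserting the indent after each newline, and computes the default
-- indent width by scanning the prefix backwards (objective: alternative decomposition).

-- ===== PORT A =====
-- A: split box into lines, compute indent width (length of prefix's last line when None),
-- prepend prefix to the first line, indent the remaining lines, join with '\n'.
def glue_prefix_box_py (prefix_ : String) (box : String) (indent_width : Option Int) : String :=
  let lines := PySem.Chars.splitOn box.toList ['\n']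
  let iw : Int :=
    match indent_width with
    | none =>
        let prefix_lines := PySem.Chars.splitOn prefix_.toList ['\n']
        -- prefix_lines[-1]: split never returns an empty list, so the default is unreachable
        (((PySem.List.pyGet? prefix_lines (-1)).getD []).length : Int)
    | some n => n
  let indent := PySem.List.pyRepeat [' '] iw
  -- lines[0]: split never returns an empty list, so the default is unreachable
  let res_lines := (prefix_.toList ++ (PySem.List.pyGet? lines 0).getD []) ::
      (PySem.List.slice lines (some 1) none).map (fun line => indent ++ line)
  String.ofList (PySem.Chars.join ['\n'] res_lines)

-- ===== PORT B =====
-- B helper: the 'for ch in reversed(prefix): if ch == "\n": break; indent_width += 1' loop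
def pvCountBack : List Char → Nat
  | [] => 0
  | c :: t => if c = '\n' then 0 else pvCountBack t + 1

-- B: default width by backward scan of the prefix; then one fold over box's characters,
-- appending each char and inserting the indent right after every newline.
def glue_prefix_box_py_alt (prefix_ : String) (box : String) (indent_width : Option Int) : String :=
  let iw : Int :=
    match indent_width with
    | none => (pvCountBack prefix_.toList.reverse : Int)
    | some n => n
  let indent := PySem.List.pyRepeat [' '] iw
  let out := box.toList.foldl
      (fun acc ch => if ch = '\n' then (acc ++ [ch]) ++ indent else acc ++ [ch])
      prefix_.toList
  String.ofList out

-- ===== PRECONDITION & SPEC =====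
def Spec_glue_prefix_box_py (prefix_ : String) (box : String) (indent_width : Option Int) (out : String) : Prop := out = glue_prefix_box_py_alt prefix_ box indent_width
instance (prefix_ : String) (box : String) (indent_width : Option Int) (out : String) : Decidable (Spec_glue_prefix_box_py prefix_ box indent_width out) := by unfold Spec_glue_prefix_box_py; infer_instance

-- ===== CLAIM (what is proved, stated in full; the proofs are below) =====
def Claim_equal_glue_prefix_box_py : Prop := ∀ (prefix_ : String) (box : String) (indent_width : Option Int), Dom_glue_prefix_box_py prefix_ box indent_width → Spec_glue_prefix_box_py prefix_ box indent_width (glue_prefix_box_py prefix_ box indent_width)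

-- ===== LEMMAS AND PROOFS =====

-- Structural characterisation of splitting on a single '\n': (first piece, remaining pieces).
def pvSplitP : List Char → List Char × List (List Char)
  | [] => ([], [])
  | c :: t =>
      let r := pvSplitP t
      if c = '\n' then ([], r.1 :: r.2) else (c :: r.1, r.2)

-- Common intermediate form: the text with ind inserted after each '\n'.
def pvRep (ind : List Char) : List Char → List Char
  | [] => []
  | c :: t => if c = '\n' then '\n' :: ind ++ pvRep ind t else c :: pvRep ind t

theorem pvSplitOn_go_eq (fuel : Nat) (l cur : List Char) (acc : List (List Char))
    (h : l.length ≤ fuel) :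
    PySem.Chars.splitOn.go ['\n'] fuel l cur acc =
      acc.reverse ++ (cur.reverse ++ (pvSplitP l).1) :: (pvSplitP l).2 := by
  induction fuel generalizing l cur acc with
  | zero =>
      cases l with
      | nil => simp [PySem.Chars.splitOn.go, pvSplitP]
      | cons c t => simp at h
  | succ n ih =>
      cases l with
      | nil => simp [PySem.Chars.splitOn.go, pvSplitP]
      | cons c t =>
          simp only [PySem.Chars.splitOn.go]
          by_cases hc : c = '\n'
          · subst hc
            simp only [List.isPrefixOf, List.length_cons] at *
            rw [if_pos (by simp)]
            simp only [List.length_nil, List.drop_zero, List.drop_succ_cons]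
            rw [ih t [] ((cur.reverse) :: acc) (by simp at h ⊢; omega)]
            simp [pvSplitP]
          · rw [if_neg (by simp [List.isPrefixOf]; exact fun h' => hc h'.symm)]
            rw [ih t (c :: cur) acc (by simp at h ⊢; omega)]
            simp [pvSplitP, hc]

theorem pvSplitOn_eq (s : List Char) :
    PySem.Chars.splitOn s ['\n'] = ((pvSplitP s).1) :: (pvSplitP s).2 := by
  show PySem.Chars.splitOn.go ['\n'] (s.length + 1) s [] [] = _
  rw [pvSplitOn_go_eq (s.length + 1) s [] [] (by omega)]
  simp

theorem pvJoin_eq (ind : List Char) (s : List Char) : ∀ (p : List Char),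
    PySem.Chars.join ['\n'] ((p ++ (pvSplitP s).1) :: (pvSplitP s).2.map (fun l => ind ++ l)) =
      p ++ pvRep ind s := by
  induction s with
  | nil => intro p; simp [pvSplitP, pvRep, PySem.Chars.join_singleton]
  | cons c t ih =>
      intro p
      by_cases hc : c = '\n'
      · subst hc
        simp only [pvSplitP, pvRep, reduceIte]
        rw [List.map_cons, PySem.Chars.join_cons_cons]
        rw [ih ind]
        simp
      · simp only [pvSplitP, pvRep]
        rw [if_neg hc, if_neg hc]
        have h1 : p ++ c :: (pvSplitP t).1 = (p ++ [c]) ++ (pvSplitP t).1 := by simp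
        rw [h1, ih (p ++ [c])]
        simp

-- A's pipeline equals the common form.
theorem pvMainA (p s ind : List Char) :
    PySem.Chars.join ['\n']
      ((p ++ (PySem.List.pyGet? (PySem.Chars.splitOn s ['\n']) 0).getD []) ::
        (PySem.List.slice (PySem.Chars.splitOn s ['\n']) (some 1) none).map (fun l => ind ++ l)) =
      p ++ pvRep ind s := by
  rw [pvSplitOn_eq]
  have h0 : PySem.List.pyGet? ((pvSplitP s).1 :: (pvSplitP s).2) 0 = some (pvSplitP s).1 := by
    simp [PySem.List.pyGet?, PySem.List.pyIdx?]
  have h1 : PySem.List.slice ((pvSplitP s).1 :: (pvSplitP s).2) (some 1) none = (pvSplitP s).2 := by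
    rw [PySem.List.slice_from _ (by norm_num)]; rfl
  rw [h0, h1]
  simpa using pvJoin_eq ind s p

-- B's fold equals the common form.
theorem pvMainB (ind : List Char) (l : List Char) : ∀ acc,
    l.foldl (fun acc ch => if ch = '\n' then (acc ++ [ch]) ++ ind else acc ++ [ch]) acc =
      acc ++ pvRep ind l := by
  induction l with
  | nil => intro acc; simp [pvRep]
  | cons c t ih =>
      intro acc
      by_cases hc : c = '\n'
      · subst hc; simp only [List.foldl_cons, reduceIte, pvRep, ih]; simp
      · simp only [List.foldl_cons, if_neg hc, pvRep, ih]; simp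

-- pvCountBack over an append: it stops inside xs iff xs contains a newline.
theorem pvCountBack_append (xs ys : List Char) :
    pvCountBack (xs ++ ys) =
      if '\n' ∈ xs then pvCountBack xs else xs.length + pvCountBack ys := by
  induction xs with
  | nil => simp
  | cons c t ih =>
      by_cases hc : c = '\n'
      · subst hc; simp [pvCountBack]
      · by_cases hm : '\n' ∈ t
        · simp [pvCountBack, hc, Ne.symm hc, ih, hm]
        · simp [pvCountBack, hc, Ne.symm hc, ih, hm]; omega

theorem pvSplitP_no_newline (t : List Char) (h : '\n' ∉ t) : pvSplitP t = (t, []) := by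
  induction t with
  | nil => rfl
  | cons c s ih =>
      simp only [List.mem_cons, not_or] at h
      simp [pvSplitP, Ne.symm h.1, ih h.2]

theorem pvSplitP_snd_ne_nil (t : List Char) (h : '\n' ∈ t) : (pvSplitP t).2 ≠ [] := by
  induction t with
  | nil => simp at h
  | cons c s ih =>
      by_cases hc : c = '\n'
      · subst hc; simp [pvSplitP]
      · rcases List.mem_cons.mp h with h1 | h2
        · exact absurd h1.symm hc
        · simp [pvSplitP, hc]; exact ih h2

-- length of the last split piece = backward scan count
theorem pvLast_eq_countBack (s : List Char) :
    ((((pvSplitP s).1 :: (pvSplitP s).2).getLastD []).length) = pvCountBack s.reverse := by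
  induction s with
  | nil => simp [pvSplitP, pvCountBack]
  | cons c t ih =>
      by_cases hc : c = '\n'
      · subst hc
        simp only [pvSplitP, reduceIte, List.reverse_cons, pvCountBack_append]
        by_cases hm : '\n' ∈ t.reverse
        · rw [if_pos hm]
          simpa [List.getLastD_cons] using ih
        · rw [if_neg hm]
          have hnt : '\n' ∉ t := fun h => hm (List.mem_reverse.mpr h)
          rw [pvSplitP_no_newline t hnt]
          simp [pvCountBack]
      · simp only [pvSplitP, if_neg hc, List.reverse_cons, pvCountBack_append]
        by_cases hm : '\n' ∈ t.reverse
        · rw [if_pos hm]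
          have hnt : '\n' ∈ t := List.mem_reverse.mp hm
          have h2 := pvSplitP_snd_ne_nil t hnt
          rcases hx : (pvSplitP t).2 with _ | ⟨y, ys⟩
          · exact absurd hx h2
          · rw [hx] at ih
            simpa [List.getLastD_cons] using ih
        · rw [if_neg hm]
          have hnt : '\n' ∉ t := fun h => hm (List.mem_reverse.mpr h)
          rw [pvSplitP_no_newline t hnt]
          simp [pvCountBack, hc]

-- the two indent-width computations agree in the None case
theorem pvWidth_eq (p : List Char) :
    (((PySem.List.pyGet? (PySem.Chars.splitOn p ['\n']) (-1)).getD []).length : Int) =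
      (pvCountBack p.reverse : Int) := by
  rw [pvSplitOn_eq, PySem.List.pyGet?_neg_one]
  have : ((pvSplitP p).1 :: (pvSplitP p).2).getLast? =
      some (((pvSplitP p).1 :: (pvSplitP p).2).getLastD []) := by
    cases h : ((pvSplitP p).1 :: (pvSplitP p).2).getLast? with
    | none => simp at h
    | some x => simp [List.getLastD_eq_getLast?, h]
  rw [this]
  simpa using congrArg (Int.ofNat) (pvLast_eq_countBack p)

-- ===== VERDICT (by name: the statement is the Claim_ definition above) =====
theorem glue_prefix_box_py_spec : Claim_equal_glue_prefix_box_py := by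
  intro prefix_ box indent_width _
  unfold Spec_glue_prefix_box_py glue_prefix_box_py glue_prefix_box_py_alt
  cases indent_width with
  | none =>
      simp only []
      rw [pvMainA, pvMainB, pvWidth_eq]
  | some n =>
      simp only []
      rw [pvMainA, pvMainB]
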